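-- pv_equiv track=rewrite | github.com/Haizard/binance-bot | alerts/performance_alerts.py | _calculate_loss_streak
-- ===== SOURCE A (Python) =====
-- from typing import Dict, Any, List, Optional
--
-- def _calculate_loss_streak(trades: List[Dict[str, Any]]) -> int:
--     """Calculate current consecutive loss streak."""
--     streak = 0
--     for trade in reversed(trades):
--         if trade.get('pnl', 0) < 0:
--             streak += 1
--         else:
--             break
--     return streak
-- ===== SOURCE B (Python) =====
-- from typing import Dict, Any, List
--
-- def _calculate_loss_streak(trades: List[Dict[str, Any]]) -> int:
--     """Forward pass: a counter that resets on any non-losing trade."""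
--     streak = 0
--     for trade in trades:
--         streak = streak + 1 if trade.get('pnl', 0) < 0 else 0
--     return streak
-- ===== Notes on version B (the rewrite author's own statement) =====
-- stated objective: alternative
-- what changed: Replaces the backward reversed() scan with early break by a single forward pass maintaining a resetting counter.
import Mathlib
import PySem

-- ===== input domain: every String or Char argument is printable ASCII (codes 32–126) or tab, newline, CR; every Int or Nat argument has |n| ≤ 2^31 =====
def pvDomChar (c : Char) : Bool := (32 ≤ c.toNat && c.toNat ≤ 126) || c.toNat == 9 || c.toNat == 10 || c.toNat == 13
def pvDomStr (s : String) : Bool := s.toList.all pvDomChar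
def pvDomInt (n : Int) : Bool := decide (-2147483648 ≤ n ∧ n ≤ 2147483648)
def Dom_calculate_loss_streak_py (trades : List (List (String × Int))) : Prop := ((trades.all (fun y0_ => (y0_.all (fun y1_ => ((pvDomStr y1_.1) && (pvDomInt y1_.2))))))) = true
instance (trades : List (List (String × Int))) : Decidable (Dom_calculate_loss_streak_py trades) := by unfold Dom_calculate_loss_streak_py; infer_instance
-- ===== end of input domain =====

-- B replaces A's backward reversed() scan with break by a single forward pass with a resetting counter (alternative decomposition, same cost).


-- ===== PORT A =====
-- A: walk trades in reverse, count while pnl < 0, break on first non-loss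
def pvA_go (ts : List (List (String × Int))) : Int :=
  match ts with
  | [] => 0
  | t :: rest => if (PySem.Dict.ofList t).getD "pnl" (0 : Int) < 0 then 1 + pvA_go rest else 0

def calculate_loss_streak_py (trades : List (List (String × Int))) : Int :=
  pvA_go trades.reverse

-- ===== PORT B =====
-- B: forward fold with a counter that resets on any non-losing trade
def calculate_loss_streak_py_alt (trades : List (List (String × Int))) : Int :=
  trades.foldl (fun streak t => if (PySem.Dict.ofList t).getD "pnl" (0 : Int) < 0 then streak + 1 else 0) 0

-- ===== PRECONDITION & SPEC =====
def Spec_calculate_loss_streak_py (trades : List (List (String × Int))) (out : Int) : Prop := out = calculate_loss_streak_py_alt trades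
instance (trades : List (List (String × Int))) (out : Int) : Decidable (Spec_calculate_loss_streak_py trades out) := by unfold Spec_calculate_loss_streak_py; infer_instance

-- ===== CLAIM (what is proved, stated in full; the proofs are below) =====
def Claim_equal_calculate_loss_streak_py : Prop := ∀ (trades : List (List (String × Int))), Dom_calculate_loss_streak_py trades → Spec_calculate_loss_streak_py trades (calculate_loss_streak_py trades)

-- ===== LEMMAS AND PROOFS =====

-- ===== VERDICT (by name: the statement is the Claim_ definition above) =====
theorem pvB_snoc (l : List (List (String × Int))) (t : List (String × Int)) (c : Int) :
    (l ++ [t]).foldl (fun streak u => if (PySem.Dict.ofList u).getD "pnl" (0 : Int) < 0 then streak + 1 else 0) c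
      = if (PySem.Dict.ofList t).getD "pnl" (0 : Int) < 0 then
          l.foldl (fun streak u => if (PySem.Dict.ofList u).getD "pnl" (0 : Int) < 0 then streak + 1 else 0) c + 1
        else 0 := by
  simp [List.foldl_append]

theorem pv_eq (l : List (List (String × Int))) :
    pvA_go l.reverse = calculate_loss_streak_py_alt l := by
  induction l using List.reverseRecOn with
  | nil => simp [pvA_go, calculate_loss_streak_py_alt]
  | append_singleton l t ih =>
    unfold calculate_loss_streak_py_alt at *
    rw [pvB_snoc, List.reverse_append]
    simp only [List.reverse_cons, List.reverse_nil, List.nil_append, List.cons_append,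
      List.singleton_append, pvA_go]
    rw [ih]
    split <;> [ring; rfl]

theorem calculate_loss_streak_py_spec : Claim_equal_calculate_loss_streak_py := by
  intro trades _
  unfold Spec_calculate_loss_streak_py calculate_loss_streak_py
  exact pv_eq trades
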